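-- pv_equiv track=rewrite | github.com/ankitshah009/leetcode_python | graphs/1849-splitting_a_string_into_descending_consecutive_values.py | splitString
-- ===== SOURCE A (Python) =====
-- def splitString(s: str) -> bool:
--     """
--     Backtracking: try each first number length.
--     """
--     def backtrack(index: int, prev: int, count: int) -> bool:
--         if index == len(s):
--             return count >= 2
--
--         # Try different lengths for current number
--         for end in range(index + 1, len(s) + 1):
--             # Don't take the entire remaining string on first number
--             if count == 0 and end == len(s):
--                 continue
--
--             num = int(s[index:end])
--
--             if count == 0 or num == prev - 1:
--                 if backtrack(end, num, count + 1):
--                     return True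
--
--         return False
--
--     return backtrack(0, -1, 0)
-- ===== SOURCE B (Python) =====
-- def splitString(s: str) -> bool:
--     n = len(s)
--     # BFS over states (i, v): s[:i] has been split into one or more chunks, the first being a
--     # proper prefix of s, the last having value v.  A state with i == n is a complete split.
--     frontier = {(e, int(s[:e])) for e in range(1, n)}
--     while frontier:
--         if any(i == n for i, _ in frontier):
--             return True
--         frontier = {(e, v - 1)
--                     for i, v in frontier
--                     for e in range(i + 1, n + 1)
--                     if int(s[i:e]) == v - 1}
--     return False
-- ===== Notes on version B (the rewrite author's own statement) =====
-- stated objective: alternative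
-- what changed: Replaces A's recursive depth-first backtracking (carrying a count accumulator) by an iterative breadth-first search: a frontier SET of (position, last-value) states, seeded with every proper prefix, advanced level by level with a set comprehension until a state reaches the end or the frontier empties.
import Mathlib
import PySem

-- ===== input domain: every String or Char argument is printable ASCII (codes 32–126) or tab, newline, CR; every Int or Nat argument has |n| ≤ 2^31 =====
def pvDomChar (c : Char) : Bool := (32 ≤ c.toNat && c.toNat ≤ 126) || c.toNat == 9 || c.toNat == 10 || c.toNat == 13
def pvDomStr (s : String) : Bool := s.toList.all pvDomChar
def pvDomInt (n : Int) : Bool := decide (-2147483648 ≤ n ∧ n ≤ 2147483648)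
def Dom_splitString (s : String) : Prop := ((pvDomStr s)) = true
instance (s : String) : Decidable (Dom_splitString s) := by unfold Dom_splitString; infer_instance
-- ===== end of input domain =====

-- B replaces A's recursive depth-first backtracking (with a count accumulator) by an iterative
-- breadth-first search over a frontier SET of (position, last-value) states (objective: alternative).

-- num = int(s[i:e]); none = ValueError, excluded by Pre_ (both ports skip that candidate there)
def parseSeg (cs : List Char) (i e : Int) : Option Int :=
  PySem.Int.ofChars? (PySem.List.slice cs (some i) (some e))

-- ===== PORT A =====
-- fuel = s.length + 1 only makes the recursion total; each backtrack call advances index by ≥ 1,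
-- so the fuel is never exhausted on the calls the Python makes.
mutual
def backA (cs : List Char) (index prev count : Int) (fuel : Nat) : Bool :=
  match fuel with
  | 0 => false
  | Nat.succ fuel =>
    if index = (cs.length : Int) then decide (2 ≤ count)
    else loopA cs index prev count fuel (PySem.List.pyRange (index + 1) ((cs.length : Int) + 1) 1)

def loopA (cs : List Char) (index prev count : Int) (fuel : Nat) (ends : List Int) : Bool :=
  match ends with
  | [] => false
  | e :: rest =>
    if count = 0 ∧ e = (cs.length : Int) then loopA cs index prev count fuel rest
    else
      match parseSeg cs index e with
      | none => loopA cs index prev count fuel rest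
      | some num =>
        if count = 0 ∨ num = prev - 1 then
          if backA cs e num (count + 1) fuel then true
          else loopA cs index prev count fuel rest
        else loopA cs index prev count fuel rest
end

def splitString (s : String) : Bool :=
  backA s.toList 0 (-1) 0 (s.toList.length + 1)

-- ===== PORT B =====
-- frontier = {(e, int(s[:e])) for e in range(1, n)}
def initFrontier (cs : List Char) (es : List Int) (acc : PySem.Set (Int × Int)) :
    PySem.Set (Int × Int) :=
  match es with
  | [] => acc
  | e :: rest =>
    match parseSeg cs 0 e with
    | none => initFrontier cs rest acc
    | some v => initFrontier cs rest (PySem.Set.add acc (e, v))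

-- inner comprehension loop: for e in range(i+1, n+1): if int(s[i:e]) == v - 1: add (e, v-1)
def expandState (cs : List Char) (i v : Int) (ends : List Int) (acc : PySem.Set (Int × Int)) :
    PySem.Set (Int × Int) :=
  match ends with
  | [] => acc
  | e :: rest =>
    match parseSeg cs i e with
    | none => expandState cs i v rest acc
    | some num =>
      expandState cs i v rest (if num = v - 1 then PySem.Set.add acc (e, v - 1) else acc)

-- outer comprehension loop: for (i, v) in frontier
def nextFrontier (cs : List Char) (states : List (Int × Int)) (acc : PySem.Set (Int × Int)) :
    PySem.Set (Int × Int) :=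
  match states with
  | [] => acc
  | (i, v) :: rest =>
    nextFrontier cs rest
      (expandState cs i v (PySem.List.pyRange (i + 1) ((cs.length : Int) + 1) 1) acc)

-- while frontier: …  (fuel = n + 1 only makes the loop total: states of the k-th frontier sit at
-- position ≥ k + 1 and ≤ n, so the frontier is empty after at most n + 1 rounds)
def bfsB (cs : List Char) (frontier : PySem.Set (Int × Int)) (fuel : Nat) : Bool :=
  match fuel with
  | 0 => false
  | Nat.succ fuel =>
    match frontier with
    | [] => false
    | _ :: _ =>
      if frontier.any (fun x => x.1 == (cs.length : Int)) then true
      else bfsB cs (nextFrontier cs frontier PySem.Set.empty) fuel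

def splitString_alt (s : String) : Bool :=
  bfsB s.toList
    (initFrontier s.toList (PySem.List.pyRange 1 (s.toList.length : Int) 1) PySem.Set.empty)
    (s.toList.length + 1)

-- ===== PRECONDITION & SPEC =====
-- Pre_ excludes exactly the inputs where A raises ValueError: any string of length ≥ 2 with a
-- non-digit character (A unconditionally parses s[0:1] and s[1:2] there).
def Pre_splitString (s : String) : Prop :=
  PySem.Str.strIsdigit s = true ∨ PySem.Str.len s ≤ 1
instance (s : String) : Decidable (Pre_splitString s) := by unfold Pre_splitString; infer_instance
def pvWitness_splitString : String := "9876"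

def Spec_splitString (s : String) (out : Bool) : Prop := out = splitString_alt s
instance (s : String) (out : Bool) : Decidable (Spec_splitString s out) := by unfold Spec_splitString; infer_instance

-- ===== CLAIM (what is proved, stated in full; the proofs are below) =====
def Claim_equal_splitString : Prop :=
  ∀ (s : String), Dom_splitString s → Pre_splitString s → Spec_splitString s (splitString s)

-- ===== LEMMAS AND PROOFS =====

-- the common semantics both searches decide: a step consumes s[i:e] as the value prev - 1,
-- and winsIn k x = from state x some chain of ≤ k steps reaches the end of the string.
def stepRel (cs : List Char) (x y : Int × Int) : Prop :=
  x.1 + 1 ≤ y.1 ∧ y.1 ≤ (cs.length : Int) ∧ parseSeg cs x.1 y.1 = some y.2 ∧ y.2 = x.2 - 1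

def winsIn (cs : List Char) : Nat → Int × Int → Prop
  | 0, x => x.1 = (cs.length : Int)
  | Nat.succ k, x =>
    x.1 = (cs.length : Int) ∨ ∃ y, stepRel cs x y ∧ winsIn cs k y

lemma winsIn_mono (cs : List Char) :
    ∀ {k m : Nat} (x : Int × Int), k ≤ m → winsIn cs k x → winsIn cs m x := by
  intro k
  induction k with
  | zero =>
    intro m x _ h0
    cases m with
    | zero => exact h0
    | succ m => exact Or.inl h0
  | succ k ih =>
    intro m x hkm h
    cases m with
    | zero => omega
    | succ m =>
      rcases h with h | ⟨y, hst, hw⟩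
      · exact Or.inl h
      · exact Or.inr ⟨y, hst, ih y (by omega) hw⟩

lemma winsIn_trim (cs : List Char) :
    ∀ (k : Nat) (x : Int × Int), winsIn cs k x → x.1 ≤ (cs.length : Int) →
      winsIn cs ((cs.length : Int) - x.1).toNat x := by
  intro k
  induction k with
  | zero =>
    intro x h _
    have : ((cs.length : Int) - x.1).toNat = 0 := by
      simp [winsIn] at h; omega
    rw [this]; exact h
  | succ k ih =>
    intro x h hx
    rcases h with h | ⟨y, hst, hw⟩
    · have h0 : winsIn cs 0 x := h
      exact winsIn_mono cs x (Nat.zero_le _) h0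
    · have hy := ih y hw hst.2.1
      have hlt : ((cs.length : Int) - y.1).toNat + 1 ≤ ((cs.length : Int) - x.1).toNat := by
        have := hst.1; have := hst.2.1; omega
      have : ((cs.length : Int) - x.1).toNat = (((cs.length : Int) - x.1).toNat - 1) + 1 := by omega
      rw [this]
      exact Or.inr ⟨y, hst, winsIn_mono cs y (by omega) hy⟩

-- A's inner for-loop: succeeds iff some end in the list passes the guard and its recursive call succeeds
lemma loopA_iff (cs : List Char) (i p c : Int) (f : Nat) :
    ∀ (ends : List Int),
      (loopA cs i p c f ends = true ↔
        ∃ e ∈ ends, ¬(c = 0 ∧ e = (cs.length : Int)) ∧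
          ∃ num, parseSeg cs i e = some num ∧ (c = 0 ∨ num = p - 1) ∧
            backA cs e num (c + 1) f = true) := by
  intro ends
  induction ends with
  | nil => simp [loopA]
  | cons e rest ih =>
    rw [loopA]
    by_cases hg : c = 0 ∧ e = (cs.length : Int)
    · rw [if_pos hg, ih]
      constructor
      · rintro ⟨e', he', h⟩; exact ⟨e', List.mem_cons_of_mem _ he', h⟩
      · rintro ⟨e', he', hng, h⟩
        rcases List.mem_cons.1 he' with rfl | he'
        · exact absurd hg hng
        · exact ⟨e', he', hng, h⟩
    · rw [if_neg hg]
      cases hp : parseSeg cs i e with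
      | none =>
        dsimp only
        rw [ih]
        constructor
        · rintro ⟨e', he', h⟩; exact ⟨e', List.mem_cons_of_mem _ he', h⟩
        · rintro ⟨e', he', hng, num, hnum, h⟩
          rcases List.mem_cons.1 he' with rfl | he'
          · rw [hp] at hnum; cases hnum
          · exact ⟨e', he', hng, num, hnum, h⟩
      | some num =>
        dsimp only
        by_cases hcond : c = 0 ∨ num = p - 1
        · rw [if_pos hcond]
          by_cases hb : backA cs e num (c + 1) f = true
          · simp only [hb, if_true, true_iff]
            exact ⟨e, List.mem_cons_self .., hg, num, hp, hcond, hb⟩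
          · simp only [Bool.not_eq_true] at hb
            rw [hb]
            simp only [Bool.false_eq_true, if_false, ih]
            constructor
            · rintro ⟨e', he', h⟩; exact ⟨e', List.mem_cons_of_mem _ he', h⟩
            · rintro ⟨e', he', hng, num', hnum', hcond', hb'⟩
              rcases List.mem_cons.1 he' with rfl | he'
              · rw [hp] at hnum'; cases hnum'; rw [hb'] at hb; cases hb
              · exact ⟨e', he', hng, num', hnum', hcond', hb'⟩
        · rw [if_neg hcond, ih]
          constructor
          · rintro ⟨e', he', h⟩; exact ⟨e', List.mem_cons_of_mem _ he', h⟩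
          · rintro ⟨e', he', hng, num', hnum', hcond', hb'⟩
            rcases List.mem_cons.1 he' with rfl | he'
            · rw [hp] at hnum'; cases hnum'; exact absurd hcond' hcond
            · exact ⟨e', he', hng, num', hnum', hcond', hb'⟩

-- A's backtracker is sound for the chain semantics
lemma backA_sound (cs : List Char) :
    ∀ (f : Nat) (i p c : Int), 1 ≤ c → backA cs i p c f = true →
      ∃ k, winsIn cs k (i, p) := by
  intro f
  induction f with
  | zero => intro i p c _ h; simp [backA] at h
  | succ f ih =>
    intro i p c hc h
    rw [backA] at h
    by_cases hi : i = (cs.length : Int)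
    · exact ⟨0, hi⟩
    · rw [if_neg hi, loopA_iff] at h
      obtain ⟨e, he, _, num, hnum, hcond, hb⟩ := h
      have hmem := (PySem.List.mem_pyRange_one).1 he
      obtain ⟨k, hk⟩ := ih e num (c + 1) (by omega) hb
      refine ⟨k + 1, Or.inr ⟨(e, num), ⟨hmem.1, by omega, hnum, ?_⟩, hk⟩⟩
      rcases hcond with h0 | h1
      · omega
      · exact h1

-- A's backtracker is complete for the chain semantics
lemma backA_complete (cs : List Char) :
    ∀ (f k : Nat) (i p c : Int), winsIn cs k (i, p) → k + 1 ≤ f → 1 ≤ c →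
      (c = 1 → i ≠ (cs.length : Int)) → backA cs i p c f = true := by
  intro f
  induction f with
  | zero => intro k i p c _ hk _ _; omega
  | succ f ih =>
    intro k i p c hw hk hc h1
    rw [backA]
    by_cases hi : i = (cs.length : Int)
    · have : c ≠ 1 := fun h => (h1 h) hi
      simp [hi, show (2:Int) ≤ c by omega]
    · rw [if_neg hi, loopA_iff]
      have : ∃ y, stepRel cs (i, p) y ∧ ∃ k', winsIn cs k' y ∧ k' + 1 ≤ k := by
        cases k with
        | zero => exact absurd hw hi
        | succ k =>
          rcases hw with hw | ⟨y, hst, hw⟩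
          · exact absurd hw hi
          · exact ⟨y, hst, k, hw, by omega⟩
      obtain ⟨⟨e, num⟩, ⟨he1, he2, hparse, hval⟩, k', hw', hk'⟩ := this
      refine ⟨e, (PySem.List.mem_pyRange_one).2 ⟨he1, by omega⟩, by omega, num, hparse,
        Or.inr hval, ih k' e num (c + 1) hw' (by omega) (by omega) (by omega)⟩

-- membership in B's initial frontier
lemma mem_initFrontier (cs : List Char) :
    ∀ (es : List Int) (acc : PySem.Set (Int × Int)) (y : Int × Int),
      y ∈ initFrontier cs es acc ↔
        y ∈ acc ∨ (y.1 ∈ es ∧ parseSeg cs 0 y.1 = some y.2) := by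
  intro es
  induction es with
  | nil => simp [initFrontier]
  | cons e rest ih =>
    intro acc y
    rw [initFrontier]
    cases hp : parseSeg cs 0 e with
    | none =>
      dsimp only
      rw [ih]
      constructor
      · rintro (h | ⟨h1, h2⟩)
        · exact Or.inl h
        · exact Or.inr ⟨List.mem_cons_of_mem _ h1, h2⟩
      · rintro (h | ⟨h1, h2⟩)
        · exact Or.inl h
        · rcases List.mem_cons.1 h1 with h1 | h1
          · rw [h1] at h2; rw [hp] at h2; cases h2
          · exact Or.inr ⟨h1, h2⟩
    | some v =>
      dsimp only
      rw [ih]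
      constructor
      · rintro (h | ⟨h1, h2⟩)
        · rcases (PySem.Set.mem_add _ _ _).1 h with h | h
          · exact Or.inl h
          · refine Or.inr ⟨?_, ?_⟩
            · rw [h]; exact List.mem_cons_self ..
            · rw [h]; exact hp
        · exact Or.inr ⟨List.mem_cons_of_mem _ h1, h2⟩
      · rintro (h | ⟨h1, h2⟩)
        · exact Or.inl ((PySem.Set.mem_add _ _ _).2 (Or.inl h))
        · rcases List.mem_cons.1 h1 with h1 | h1
          · refine Or.inl ((PySem.Set.mem_add _ _ _).2 (Or.inr ?_))
            rw [h1] at h2; rw [hp] at h2; cases h2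
            exact Prod.ext h1 rfl
          · exact Or.inr ⟨h1, h2⟩

-- membership after expanding one state
lemma mem_expandState (cs : List Char) (i v : Int) :
    ∀ (ends : List Int) (acc : PySem.Set (Int × Int)) (y : Int × Int),
      y ∈ expandState cs i v ends acc ↔
        y ∈ acc ∨ (y.1 ∈ ends ∧ parseSeg cs i y.1 = some (v - 1) ∧ y.2 = v - 1) := by
  intro ends
  induction ends with
  | nil => simp [expandState]
  | cons e rest ih =>
    intro acc y
    rw [expandState]
    cases hp : parseSeg cs i e with
    | none =>
      dsimp only
      rw [ih]
      constructor
      · rintro (h | ⟨h1, h2⟩)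
        · exact Or.inl h
        · exact Or.inr ⟨List.mem_cons_of_mem _ h1, h2⟩
      · rintro (h | ⟨h1, h2, h3⟩)
        · exact Or.inl h
        · rcases List.mem_cons.1 h1 with h1 | h1
          · rw [h1] at h2; rw [hp] at h2; cases h2
          · exact Or.inr ⟨h1, h2, h3⟩
    | some num =>
      dsimp only
      rw [ih]
      by_cases hnum : num = v - 1
      · rw [if_pos hnum]
        constructor
        · rintro (h | ⟨h1, h2⟩)
          · rcases (PySem.Set.mem_add _ _ _).1 h with h | h
            · exact Or.inl h
            · refine Or.inr ⟨?_, ?_, ?_⟩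
              · rw [h]; exact List.mem_cons_self ..
              · rw [h]; rw [hp, hnum]
              · rw [h]
          · exact Or.inr ⟨List.mem_cons_of_mem _ h1, h2⟩
        · rintro (h | ⟨h1, h2, h3⟩)
          · exact Or.inl ((PySem.Set.mem_add _ _ _).2 (Or.inl h))
          · rcases List.mem_cons.1 h1 with h1 | h1
            · exact Or.inl ((PySem.Set.mem_add _ _ _).2 (Or.inr (Prod.ext h1 h3)))
            · exact Or.inr ⟨h1, h2, h3⟩
      · rw [if_neg hnum]
        constructor
        · rintro (h | ⟨h1, h2⟩)
          · exact Or.inl h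
          · exact Or.inr ⟨List.mem_cons_of_mem _ h1, h2⟩
        · rintro (h | ⟨h1, h2, h3⟩)
          · exact Or.inl h
          · rcases List.mem_cons.1 h1 with h1 | h1
            · rw [h1, hp] at h2; cases h2; exact absurd rfl hnum
            · exact Or.inr ⟨h1, h2, h3⟩

-- membership in the next frontier = one step from some state of the current frontier
lemma mem_nextFrontier (cs : List Char) :
    ∀ (states : List (Int × Int)) (acc : PySem.Set (Int × Int)) (y : Int × Int),
      y ∈ nextFrontier cs states acc ↔
        y ∈ acc ∨ ∃ x ∈ states, stepRel cs x y := by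
  intro states
  induction states with
  | nil => simp [nextFrontier]
  | cons x rest ih =>
    intro acc y
    obtain ⟨i, v⟩ := x
    rw [nextFrontier, ih, mem_expandState]
    constructor
    · rintro ((h | ⟨h1, h2, h3⟩) | ⟨x, hx, hst⟩)
      · exact Or.inl h
      · have hmem := (PySem.List.mem_pyRange_one).1 h1
        exact Or.inr ⟨(i, v), List.mem_cons_self ..,
          hmem.1, by have := hmem.2; omega, by simpa [h3] using h2, h3⟩
      · exact Or.inr ⟨x, List.mem_cons_of_mem _ hx, hst⟩
    · rintro (h | ⟨x, hx, hst⟩)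
      · exact Or.inl (Or.inl h)
      · rcases List.mem_cons.1 hx with rfl | hx
        · obtain ⟨h1, h2, h3, h4⟩ := hst
          exact Or.inl (Or.inr ⟨(PySem.List.mem_pyRange_one).2 ⟨h1, by omega⟩,
            by rw [← h4]; exact h3, h4⟩)
        · exact Or.inr ⟨x, hx, hst⟩

-- B's BFS is sound for the chain semantics
lemma bfsB_sound (cs : List Char) :
    ∀ (f : Nat) (frontier : PySem.Set (Int × Int)), bfsB cs frontier f = true →
      ∃ x ∈ frontier, ∃ k, winsIn cs k x := by
  intro f
  induction f with
  | zero => intro fr h; simp [bfsB] at h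
  | succ f ih =>
    intro fr h
    rw [bfsB.eq_def] at h
    match fr, h with
    | x₀ :: rest, h =>
      by_cases ha : (x₀ :: rest).any (fun x => x.1 == (cs.length : Int)) = true
      · obtain ⟨x, hx, hacc⟩ := List.any_eq_true.1 ha
        exact ⟨x, hx, 0, by simpa using hacc⟩
      · simp only [Bool.not_eq_true] at ha
        rw [ha] at h
        simp only [Bool.false_eq_true, if_false] at h
        obtain ⟨y, hy, k, hk⟩ := ih _ h
        rcases (mem_nextFrontier cs _ _ _).1 hy with hy | ⟨x, hx, hst⟩
        · simp [PySem.Set.empty] at hy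
        · exact ⟨x, hx, k + 1, Or.inr ⟨y, hst, hk⟩⟩

-- B's BFS is complete for the chain semantics
lemma bfsB_complete (cs : List Char) :
    ∀ (f k : Nat) (frontier : PySem.Set (Int × Int)) (x : Int × Int),
      x ∈ frontier → winsIn cs k x → k + 1 ≤ f → bfsB cs frontier f = true := by
  intro f
  induction f with
  | zero => intro k fr x _ _ hk; omega
  | succ f ih =>
    intro k fr x hx hw hk
    rw [bfsB.eq_def]
    match fr, hx with
    | x₀ :: rest, hx =>
      by_cases ha : (x₀ :: rest).any (fun y => y.1 == (cs.length : Int)) = true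
      · rw [ha]; rfl
      · simp only [Bool.not_eq_true] at ha
        rw [ha]
        simp only [Bool.false_eq_true, if_false]
        have hxn : x.1 ≠ (cs.length : Int) := by
          intro hcon
          rw [List.any_eq_false] at ha
          exact absurd (by simpa using hcon) (by simpa using ha x hx)
        have : ∃ y, stepRel cs x y ∧ ∃ k', winsIn cs k' y ∧ k' + 1 ≤ k := by
          cases k with
          | zero => exact absurd hw hxn
          | succ k =>
            rcases hw with hw | ⟨y, hst, hw⟩
            · exact absurd hw hxn
            · exact ⟨y, hst, k, hw, by omega⟩
        obtain ⟨y, hst, k', hw', hk'⟩ := this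
        exact ih k' _ y ((mem_nextFrontier cs _ _ _).2 (Or.inr ⟨x, hx, hst⟩)) hw' (by omega)

-- both searches decide the same proposition: some start state wins
lemma splitString_iff (s : String) (hn : 1 ≤ s.toList.length) :
    (splitString s = true ↔
      ∃ e num, e ∈ PySem.List.pyRange 1 (s.toList.length : Int) 1 ∧
        parseSeg s.toList 0 e = some num ∧ ∃ k, winsIn s.toList k (e, num)) := by
  generalize hcs : s.toList = cs at *
  unfold splitString
  rw [hcs, backA, if_neg (by omega)]
  rw [loopA_iff]
  constructor
  · rintro ⟨e, he, hg, num, hnum, _, hb⟩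
    have hmem := (PySem.List.mem_pyRange_one).1 he
    have he' : e ∈ PySem.List.pyRange 1 (cs.length : Int) 1 := by
      refine (PySem.List.mem_pyRange_one).2 ⟨by omega, ?_⟩
      have : ¬ e = (cs.length : Int) := fun h => hg ⟨rfl, h⟩
      omega
    obtain ⟨k, hk⟩ := backA_sound cs _ e num 1 (by omega) hb
    exact ⟨e, num, he', hnum, k, hk⟩
  · rintro ⟨e, num, he, hnum, k, hk⟩
    have hmem := (PySem.List.mem_pyRange_one).1 he
    have htrim := winsIn_trim cs k (e, num) hk (by simpa using by omega)
    refine ⟨e, (PySem.List.mem_pyRange_one).2 ⟨hmem.1, by omega⟩, by omega, num, hnum,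
      Or.inl rfl, backA_complete cs cs.length _ e num 1 htrim ?_ (by omega) (fun _ => by simpa using by omega)⟩
    have h1 : (1:Int) ≤ e := hmem.1
    have h2 : e < (cs.length : Int) := hmem.2
    omega

lemma splitString_alt_iff (s : String) :
    (splitString_alt s = true ↔
      ∃ e num, e ∈ PySem.List.pyRange 1 (s.toList.length : Int) 1 ∧
        parseSeg s.toList 0 e = some num ∧ ∃ k, winsIn s.toList k (e, num)) := by
  generalize hcs : s.toList = cs at *
  unfold splitString_alt
  rw [hcs]
  constructor
  · intro h
    obtain ⟨x, hx, k, hk⟩ := bfsB_sound cs _ _ h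
    rcases (mem_initFrontier cs _ _ _).1 hx with hx | ⟨h1, h2⟩
    · simp [PySem.Set.empty] at hx
    · exact ⟨x.1, x.2, h1, h2, k, hk⟩
  · rintro ⟨e, num, he, hnum, k, hk⟩
    have hmem := (PySem.List.mem_pyRange_one).1 he
    have hin : (e, num) ∈ initFrontier cs (PySem.List.pyRange 1 (cs.length : Int) 1) PySem.Set.empty :=
      (mem_initFrontier cs _ _ _).2 (Or.inr ⟨he, hnum⟩)
    have htrim := winsIn_trim cs k (e, num) hk (by simpa using by omega)
    refine bfsB_complete cs (cs.length + 1) _ _ (e, num) hin htrim ?_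
    have h1 : (1:Int) ≤ e := hmem.1
    have h2 : e < (cs.length : Int) := hmem.2
    omega

-- ===== VERDICT (by name: the statement is the Claim_ definition above) =====
theorem splitString_spec : Claim_equal_splitString := by
  intro s _ _
  unfold Spec_splitString
  by_cases hn : 1 ≤ s.toList.length
  · have h := (splitString_iff s hn).trans (splitString_alt_iff s).symm
    cases hA : splitString s <;> cases hB : splitString_alt s
    · rfl
    · exact absurd (h.mpr hB) (by rw [hA]; simp)
    · exact absurd (h.mp hA) (by rw [hB]; simp)
    · rfl
  · have h0 : s.toList.length = 0 := by omega
    have hnil : s.toList = [] := List.eq_nil_of_length_eq_zero h0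
    unfold splitString splitString_alt
    rw [hnil]
    simp [backA, bfsB, initFrontier, PySem.List.pyRange_one_eq_nil, PySem.Set.empty]
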